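-- pv_equiv track=rewrite | github.com/vokbuda/ADM-HW1 | scripts.py | generate_consonant_substrings
-- ===== SOURCE A (Python) =====
-- def generate_consonant_substrings(input_str):
--     length = len(input_str)
--     res_c = 0
--     res_v = 0
--
--     for i in range(length):
--         if input_str[i] in {'A','E', 'O', 'U', 'I'}:
--             res_v += length - i
--         else:
--             res_c += length - i
--
--     return res_c, res_v
-- ===== SOURCE B (Python) =====
-- def generate_consonant_substrings(input_str):
--     # Each position j (1-based) contributes the number of vowels/consonants seen
--     # so far: sum of prefix counts equals sum of (length - i) weights.
--     res_c = 0
--     res_v = 0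
--     seen = 0
--     vowels = 0
--     for ch in input_str:
--         seen += 1
--         if ch in {'A', 'E', 'O', 'U', 'I'}:
--             vowels += 1
--         res_v += vowels
--         res_c += seen - vowels
--     return res_c, res_v
-- ===== Notes on version B (the rewrite author's own statement) =====
-- stated objective: alternative
-- what changed: Replaces A's per-index weight accumulation (adding length - i at each position, needing len and indexing) with a prefix-count accumulation: a single index-free pass maintains running vowel/consonant counts and adds the running counts at every step, since sum of prefix counts equals sum of (length - i) weights.
import Mathlib
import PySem

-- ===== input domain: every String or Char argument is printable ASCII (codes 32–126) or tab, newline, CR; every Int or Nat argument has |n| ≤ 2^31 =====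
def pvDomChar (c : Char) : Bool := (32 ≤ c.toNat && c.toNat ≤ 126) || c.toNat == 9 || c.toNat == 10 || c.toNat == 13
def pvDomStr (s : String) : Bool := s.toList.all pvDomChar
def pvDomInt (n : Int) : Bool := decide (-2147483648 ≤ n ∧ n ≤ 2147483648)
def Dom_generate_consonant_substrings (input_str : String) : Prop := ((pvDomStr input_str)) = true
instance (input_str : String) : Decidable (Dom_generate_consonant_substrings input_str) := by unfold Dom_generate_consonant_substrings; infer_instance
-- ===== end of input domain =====

-- ===== PORT A =====
-- A: one pass over the indices, adding (length - i) to the vowel or the consonant counter.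
def generate_consonant_substrings (input_str : String) : Int × Int :=
  let cs := input_str.toList
  let length : Int := cs.length
  let rcv :=
    (PySem.List.pyRange 0 length 1).foldl
      (fun (acc : Int × Int) i =>
        if PySem.List.pyGetD cs i ' ' ∈ PySem.Set.ofList ['A', 'E', 'O', 'U', 'I'] then
          (acc.1, acc.2 + (length - i))
        else
          (acc.1 + (length - i), acc.2))
      (0, 0)
  (rcv.1, rcv.2)

-- ===== PORT B =====
-- B: index-free pass keeping running prefix counts (seen, vowels) and adding the
-- running vowel/consonant counts to the results at each step.
def generate_consonant_substrings_alt (input_str : String) : Int × Int :=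
  let st :=
    input_str.toList.foldl
      (fun (a : Int × Int × Int × Int) ch =>
        let seen := a.1 + 1
        let vowels :=
          if ch ∈ PySem.Set.ofList ['A', 'E', 'O', 'U', 'I'] then a.2.1 + 1 else a.2.1
        (seen, vowels, a.2.2.1 + (seen - vowels), a.2.2.2 + vowels))
      (0, 0, 0, 0)
  (st.2.2.1, st.2.2.2)

-- ===== PRECONDITION & SPEC =====
def Spec_generate_consonant_substrings (input_str : String) (out : Int × Int) : Prop := out = generate_consonant_substrings_alt input_str
instance (input_str : String) (out : Int × Int) : Decidable (Spec_generate_consonant_substrings input_str out) := by unfold Spec_generate_consonant_substrings; infer_instance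

-- ===== CLAIM (what is proved, stated in full; the proofs are below) =====
def Claim_equal_generate_consonant_substrings : Prop := ∀ (input_str : String), Dom_generate_consonant_substrings input_str → Spec_generate_consonant_substrings input_str (generate_consonant_substrings input_str)

-- ===== LEMMAS AND PROOFS =====

-- the vowel test, abstracted for the lemmas
def pvIsV (c : Char) : Bool := decide (c ∈ PySem.Set.ofList ['A', 'E', 'O', 'U', 'I'])

-- recursive weight sums: total weight, vowel weight, vowel count of a suffix
def pvTot : List Char → Int
  | [] => 0
  | _ :: t => ((t.length : Int) + 1) + pvTot t

def pvWv : List Char → Int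
  | [] => 0
  | h :: t => (if pvIsV h then (t.length : Int) + 1 else 0) + pvWv t

def pvVc : List Char → Int
  | [] => 0
  | h :: t => (if pvIsV h then 1 else 0) + pvVc t

-- A's fold over range(len) with indexed access equals a fold over enumerate of the tail.
theorem fold_range_enum {β : Type} (full : List Char) (f : β → Int → Char → β) :
    ∀ (k : Nat) (acc : β), k ≤ full.length →
      (PySem.List.pyRange k full.length 1).foldl
        (fun a i => f a i (PySem.List.pyGetD full i ' ')) acc
      = (PySem.List.enumerate (full.drop k) k).foldl (fun a p => f a p.1 p.2) acc := by
  intro k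
  induction h : full.length - k generalizing k with
  | zero =>
    intro acc hk
    have hk' : full.length = k := by omega
    rw [PySem.List.pyRange_one_eq_nil (by exact_mod_cast hk'.le)]
    rw [List.drop_of_length_le hk'.le]
    simp [PySem.List.enumerate]
  | succ n ih =>
    intro acc hk
    have hlt : k < full.length := by omega
    rw [PySem.List.pyRange_one_cons (by exact_mod_cast hlt)]
    have hdrop : full.drop k = full[k] :: full.drop (k + 1) :=
      List.drop_eq_getElem_cons hlt
    rw [hdrop, PySem.List.enumerate_cons]
    simp only [List.foldl_cons]
    have hget : PySem.List.pyGetD full (k : Int) ' ' = full[k] := by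
      rw [PySem.List.pyGetD_natCast]
      exact List.getD_eq_getElem _ _ hlt
    rw [hget]
    have : ((k : Int) + 1) = ((k + 1 : Nat) : Int) := by push_cast; ring
    rw [this]
    exact ih (k + 1) (by omega) _ (by omega)

-- A's pair-accumulating fold over (index, char) pairs, characterised by pvTot / pvWv:
-- when started at offset k with length L = k + |cs|, the weights L - i are |suffix|-sizes.
theorem pairfold (L : Int) : ∀ (cs : List Char) (k : Int), L = k + cs.length →
    ∀ (c v : Int),
      (PySem.List.enumerate cs k).foldl
        (fun (a : Int × Int) p =>
          if p.2 ∈ PySem.Set.ofList ['A', 'E', 'O', 'U', 'I'] then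
            (a.1, a.2 + (L - p.1))
          else
            (a.1 + (L - p.1), a.2))
        (c, v)
      = (c + (pvTot cs - pvWv cs), v + pvWv cs) := by
  intro cs
  induction cs with
  | nil => intro k _ c v; simp [PySem.List.enumerate, pvTot, pvWv]
  | cons hd tl ih =>
    intro k hL c v
    rw [PySem.List.enumerate_cons]
    simp only [List.foldl_cons]
    have hw : L - k = (tl.length : Int) + 1 := by
      simp only [List.length_cons] at hL; push_cast at hL ⊢; omega
    by_cases hv : hd ∈ PySem.Set.ofList ['A', 'E', 'O', 'U', 'I']
    · have hb : pvIsV hd = true := by simp [pvIsV, hv]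
      rw [if_pos hv, ih (k + 1) (by simp only [List.length_cons] at hL; push_cast at hL ⊢; omega)]
      simp only [pvTot, pvWv, hb, if_true, Prod.mk.injEq]
      constructor <;> (rw [hw] at *; ring)
    · have hb : pvIsV hd = false := by simp [pvIsV, hv]
      rw [if_neg hv, ih (k + 1) (by simp only [List.length_cons] at hL; push_cast at hL ⊢; omega)]
      simp only [pvTot, pvWv, hb, Bool.false_eq_true, if_false, Prod.mk.injEq]
      constructor <;> (rw [hw] at *; ring)

-- B's fold characterised: from state (s0, v0, c0, w0) it returns
-- (s0 + n, v0 + vc, c0 + s0*n + tot - v0*n - wv, w0 + v0*n + wv).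
theorem bfold : ∀ (cs : List Char) (s0 v0 c0 w0 : Int),
    cs.foldl
      (fun (a : Int × Int × Int × Int) ch =>
        let seen := a.1 + 1
        let vowels :=
          if ch ∈ PySem.Set.ofList ['A', 'E', 'O', 'U', 'I'] then a.2.1 + 1 else a.2.1
        (seen, vowels, a.2.2.1 + (seen - vowels), a.2.2.2 + vowels))
      (s0, v0, c0, w0)
    = (s0 + cs.length, v0 + pvVc cs,
       c0 + s0 * cs.length + pvTot cs - v0 * cs.length - pvWv cs,
       w0 + v0 * cs.length + pvWv cs) := by
  intro cs
  induction cs with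
  | nil => intro s0 v0 c0 w0; simp [pvVc, pvTot, pvWv]
  | cons hd tl ih =>
    intro s0 v0 c0 w0
    simp only [List.foldl_cons]
    by_cases hv : hd ∈ PySem.Set.ofList ['A', 'E', 'O', 'U', 'I']
    · have hb : pvIsV hd = true := by simp [pvIsV, hv]
      rw [if_pos hv, ih]
      simp only [pvVc, pvTot, pvWv, hb, if_true, List.length_cons, Prod.mk.injEq]
      push_cast
      refine ⟨by ring, by ring, by ring, by ring⟩
    · have hb : pvIsV hd = false := by simp [pvIsV, hv]
      rw [if_neg hv, ih]
      simp only [pvVc, pvTot, pvWv, hb, Bool.false_eq_true, if_false, List.length_cons,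
        Prod.mk.injEq]
      push_cast
      refine ⟨by ring, by ring, by ring, by ring⟩

-- ===== VERDICT (by name: the statement is the Claim_ definition above) =====
theorem generate_consonant_substrings_spec : Claim_equal_generate_consonant_substrings := by
  intro s _
  unfold Spec_generate_consonant_substrings generate_consonant_substrings
    generate_consonant_substrings_alt
  simp only []
  set cs := s.toList with hcs
  have h1 := fold_range_enum cs
    (fun (a : Int × Int) i ch =>
      if ch ∈ PySem.Set.ofList ['A', 'E', 'O', 'U', 'I'] then (a.1, a.2 + ((cs.length : Int) - i))
      else (a.1 + ((cs.length : Int) - i), a.2)) 0 (0, 0) (Nat.zero_le _)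
  simp only [List.drop_zero, Nat.cast_zero] at h1
  rw [h1, pairfold (cs.length : Int) cs 0 (by ring), bfold]
  simp only [Prod.mk.injEq]
  constructor <;> ring
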